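-- pv_equiv track=rewrite | github.com/chrisrobingeorge-ai/alberta_ballet_title_scoring_app.py | scripts/pull_show_data.py | generate_show_id
-- ===== SOURCE A (Python) =====
-- from typing import List, Optional
--
-- def generate_show_id(show_title: str, season: Optional[str] = None) -> str:
--     """
--     Generate a show ID from the title and optional season.
--
--     Args:
--         show_title: Show title
--         season: Optional season (e.g., "2024-25")
--
--     Returns:
--         Sanitized show ID string
--     """
--     base_id = show_title.lower().replace(" ", "_")
--     # Remove special characters
--     base_id = "".join(c for c in base_id if c.isalnum() or c == "_")
--     # Collapse multiple underscores
--     while "__" in base_id: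
--         base_id = base_id.replace("__", "_")
--     base_id = base_id.strip("_")
--
--     if season:
--         # Add season to make it unique
--         season_suffix = season.replace("-", "_")
--         base_id = f"{base_id}_{season_suffix}"
--
--     return base_id
-- ===== SOURCE B (Python) =====
-- def generate_show_id(show_title, season=None):
--     """Single pass over the lowered title: emit alnum chars, fuse space/underscore
--     runs into one '_' via a last-emitted-underscore flag, drop everything else."""
--     out = []
--     prev_us = False
--     for c in show_title.lower():
--         if c.isalnum():
--             out.append(c)
--             prev_us = False
--         elif c == " " or c == "_":
--             if not prev_us:
--                 out.append("_")
--             prev_us = True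
--     base = "".join(out).strip("_")
--     if season:
--         base = base + "_" + season.replace("-", "_")
--     return base
-- ===== Notes on version B (the rewrite author's own statement) =====
-- stated objective: simpler
-- what changed: Replaces A's four-stage pipeline (map spaces to underscores, filter non-alphanumerics, a while-loop repeatedly collapsing doubled underscores, then strip) by a single pass over the lowered title that emits alphanumeric chars and fuses each run of spaces/underscores into a single underscore using a last-emitted-underscore flag.
import Mathlib
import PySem

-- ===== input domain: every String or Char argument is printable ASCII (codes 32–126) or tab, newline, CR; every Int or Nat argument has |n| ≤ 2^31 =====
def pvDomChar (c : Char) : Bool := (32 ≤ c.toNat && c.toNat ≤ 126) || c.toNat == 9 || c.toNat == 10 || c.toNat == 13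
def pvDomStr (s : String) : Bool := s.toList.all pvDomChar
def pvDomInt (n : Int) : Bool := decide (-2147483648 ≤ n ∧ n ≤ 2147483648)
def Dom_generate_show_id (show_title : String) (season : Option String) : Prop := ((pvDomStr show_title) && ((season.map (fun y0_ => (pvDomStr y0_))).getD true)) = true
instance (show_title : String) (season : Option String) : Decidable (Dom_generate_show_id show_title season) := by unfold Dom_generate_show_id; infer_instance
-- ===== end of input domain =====

-- B builds the slug in ONE pass with a last-emitted-underscore flag, instead of A's
-- replace/filter/while-replace-collapse pipeline (objective: simpler; return value only, no mutation).

-- ===== PORT A =====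
-- pvRep and its lemmas are cited by pvCollapse's termination proof, so they stay above the port.
-- pvRep is the left-to-right one-step result of base_id.replace("__", "_").
def pvRep : List Char → List Char
  | [] => []
  | [c] => [c]
  | c1 :: c2 :: t =>
    if c1 = '_' ∧ c2 = '_' then '_' :: pvRep t else c1 :: pvRep (c2 :: t)
termination_by l => l.length

theorem pvRep_length_le (cs : List Char) : (pvRep cs).length ≤ cs.length := by
  fun_induction pvRep cs <;> simp_all
  all_goals omega

theorem pvGo_eq (fuel : Nat) (l acc : List Char) (h : l.length ≤ fuel) :
    PySem.Chars.replace.go ['_', '_'] ['_'] fuel l acc = acc.reverse ++ pvRep l := by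
  induction fuel generalizing l acc with
  | zero =>
    have : l = [] := by cases l <;> simp_all
    subst this; simp [PySem.Chars.replace.go, pvRep]
  | succ fuel ih =>
    match l with
    | [] => simp [PySem.Chars.replace.go, pvRep]
    | [c] =>
      have hp : (['_', '_'].isPrefixOf [c]) = false := by
        cases hb : ['_', '_'].isPrefixOf [c]
        · rfl
        · exact absurd (List.IsPrefix.length_le (List.isPrefixOf_iff_prefix.mp hb)) (by simp)
      simp only [PySem.Chars.replace.go, hp, Bool.false_eq_true, if_false]
      rw [ih [] (c :: acc) (by simp)]
      simp [pvRep]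
    | c1 :: c2 :: t =>
      by_cases hu : c1 = '_' ∧ c2 = '_'
      · obtain ⟨rfl, rfl⟩ := hu
        have hp : (['_', '_'].isPrefixOf ('_' :: '_' :: t)) = true := by
          apply List.isPrefixOf_iff_prefix.mpr
          exact ⟨t, rfl⟩
        simp only [PySem.Chars.replace.go, hp, if_true]
        rw [show List.drop ['_', '_'].length ('_' :: '_' :: t) = t from rfl,
          show ['_'].reverse ++ acc = '_' :: acc from rfl,
          ih t ('_' :: acc) (by simp at h ⊢; omega)]
        simp [pvRep]
      · have hp : (['_', '_'].isPrefixOf (c1 :: c2 :: t)) = false := by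
          cases hb : ['_', '_'].isPrefixOf (c1 :: c2 :: t)
          · rfl
          · have := List.isPrefixOf_iff_prefix.mp hb
            rw [List.cons_prefix_cons] at this
            obtain ⟨h1, h2⟩ := this
            rw [List.cons_prefix_cons] at h2
            exact absurd ⟨h1.symm, h2.1.symm⟩ hu
        simp only [PySem.Chars.replace.go, hp, Bool.false_eq_true, if_false]
        rw [ih (c2 :: t) (c1 :: acc) (by simp at h ⊢; omega)]
        simp [pvRep, hu]

theorem pvReplace_eq (cs : List Char) :
    PySem.Chars.replace cs ['_', '_'] ['_'] = pvRep cs := by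
  simpa [PySem.Chars.replace] using pvGo_eq cs.length cs [] le_rfl

theorem pvRep_lt (cs : List Char) (h : ['_', '_'] <:+: cs) :
    (pvRep cs).length < cs.length := by
  fun_induction pvRep cs with
  | case1 => simp at h
  | case2 c => exact absurd (List.IsInfix.length_le h) (by simp)
  | case3 c1 c2 t hu ih =>
    have := pvRep_length_le t
    simp; omega
  | case4 c1 c2 t hu ih =>
    have hnp : ¬ (['_', '_'] <+: (c1 :: c2 :: t)) := by
      intro hp
      rw [List.cons_prefix_cons] at hp
      obtain ⟨h1, h2⟩ := hp
      rw [List.cons_prefix_cons] at h2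
      exact hu ⟨h1.symm, h2.1.symm⟩
    have : ['_', '_'] <:+: (c2 :: t) := by
      rcases List.infix_cons_iff.mp h with hp | hi
      · exact absurd hp hnp
      · exact hi
    have := ih this
    simp at this ⊢; omega

-- the genexp predicate  c.isalnum() or c == "_"
def pvKeep (c : Char) : Bool := PySem.Chars.isalnum c || c == '_'

-- the `while "__" in base_id: base_id = base_id.replace("__", "_")` loop
def pvCollapse (cs : List Char) : List Char :=
  if h : PySem.Chars.isIn ['_', '_'] cs = true then
    pvCollapse (PySem.Chars.replace cs ['_', '_'] ['_'])
  else cs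
termination_by cs.length
decreasing_by
  rw [pvReplace_eq]
  exact pvRep_lt _ ((PySem.Chars.isIn_iff_infix _ _).mp h)

def generate_show_id (show_title : String) (season : Option String) : String :=
  let base1 := PySem.Chars.replace (PySem.Chars.lower show_title.toList) [' '] ['_']
  let base2 := base1.filter pvKeep
  let base3 := pvCollapse base2
  let base4 := PySem.Chars.stripChars base3 ['_']
  match season with
  | none => String.ofList base4
  | some s =>
    if s.toList.isEmpty then String.ofList base4
    else String.ofList (base4 ++ '_' :: PySem.Chars.replace s.toList ['-'] ['_'])

-- ===== PORT B =====
-- the loop body of Source B: state = (out, prev_us)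
def pvStep (st : List Char × Bool) (c : Char) : List Char × Bool :=
  if PySem.Chars.isalnum c then (st.1 ++ [c], false)
  else if c = ' ' ∨ c = '_' then (if st.2 then st else (st.1 ++ ['_'], true))
  else st

def generate_show_id_alt (show_title : String) (season : Option String) : String :=
  let out := ((PySem.Chars.lower show_title.toList).foldl pvStep ([], false)).1
  let base := PySem.Chars.stripChars out ['_']
  match season with
  | none => String.ofList base
  | some s =>
    if s.toList.isEmpty then String.ofList base
    else String.ofList (base ++ '_' :: PySem.Chars.replace s.toList ['-'] ['_'])

-- ===== PRECONDITION & SPEC =====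
def Spec_generate_show_id (show_title : String) (season : Option String) (out : String) : Prop := out = generate_show_id_alt show_title season
instance (show_title : String) (season : Option String) (out : String) : Decidable (Spec_generate_show_id show_title season out) := by unfold Spec_generate_show_id; infer_instance

-- ===== CLAIM (what is proved, stated in full; the proofs are below) =====
def Claim_equal_generate_show_id : Prop := ∀ (show_title : String) (season : Option String), Dom_generate_show_id show_title season → Spec_generate_show_id show_title season (generate_show_id show_title season)

-- ===== LEMMAS AND PROOFS =====

-- the canonical underscore-squeeze of a list that already went through map/filter
def pvSqU : Bool → List Char → List Char
  | _, [] => []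
  | b, c :: t =>
    if c = '_' then (if b then pvSqU true t else '_' :: pvSqU true t)
    else c :: pvSqU false t

-- the canonical one-pass squeeze over the raw lowered characters (what B computes)
def pvSq : Bool → List Char → List Char
  | _, [] => []
  | b, c :: t =>
    if PySem.Chars.isalnum c then c :: pvSq false t
    else if c = ' ' ∨ c = '_' then (if b then pvSq true t else '_' :: pvSq true t)
    else pvSq b t

theorem pvSqU_rep (cs : List Char) : ∀ b, pvSqU b (pvRep cs) = pvSqU b cs := by
  fun_induction pvRep cs with
  | case1 => intro b; rfl
  | case2 c => intro b; rfl
  | case3 c1 c2 t hu ih =>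
    obtain ⟨rfl, rfl⟩ := hu
    intro b
    cases b <;> simp [pvSqU, ih]
  | case4 c1 c2 t hu ih =>
    intro b
    by_cases hc : c1 = '_' <;> cases b <;> simp [pvSqU, hc, ih]

theorem pvSqU_fix (cs : List Char) (h : ¬ ['_', '_'] <:+: cs) :
    pvSqU false cs = cs ∧ ((∀ d, cs ≠ '_' :: d) → pvSqU true cs = cs) := by
  induction cs with
  | nil => exact ⟨rfl, fun _ => rfl⟩
  | cons c t ih =>
    have hnp : ¬ (['_', '_'] <+: (c :: t)) := fun hp => h (hp.isInfix)
    have hnt : ¬ ['_', '_'] <:+: t := fun hi => h (List.infix_cons_iff.mpr (Or.inr hi))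
    obtain ⟨ih1, ih2⟩ := ih hnt
    by_cases hc : c = '_'
    · subst hc
      have hhead : ∀ d, t ≠ '_' :: d := by
        intro d hd
        exact hnp (by rw [hd]; exact List.cons_prefix_cons.mpr ⟨rfl, List.cons_prefix_cons.mpr ⟨rfl, List.nil_prefix⟩⟩)
      refine ⟨?_, fun hq => absurd rfl (hq t)⟩
      simp [pvSqU, ih2 hhead]
    · exact ⟨by simp [pvSqU, hc, ih1], fun _ => by simp [pvSqU, hc, ih1]⟩

theorem pvCollapse_eq (cs : List Char) : pvCollapse cs = pvSqU false cs := by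
  fun_induction pvCollapse cs with
  | case1 cs h ih =>
    rw [ih, pvReplace_eq, pvSqU_rep]
  | case2 cs h =>
    have : ¬ ['_', '_'] <:+: cs := by
      exact (PySem.Chars.isIn_eq_false_iff _ _).mp (by simpa using h)
    exact ((pvSqU_fix cs this).1).symm

-- base_id.replace(" ", "_") is the character map pvSp
def pvSp (c : Char) : Char := if c = ' ' then '_' else c

theorem pvGoSp_eq (fuel : Nat) (l acc : List Char) (h : l.length ≤ fuel) :
    PySem.Chars.replace.go [' '] ['_'] fuel l acc = acc.reverse ++ l.map pvSp := by
  induction fuel generalizing l acc with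
  | zero =>
    have : l = [] := by cases l <;> simp_all
    subst this; simp [PySem.Chars.replace.go]
  | succ fuel ih =>
    match l with
    | [] => simp [PySem.Chars.replace.go]
    | c :: t =>
      by_cases hc : c = ' '
      · subst hc
        have hp : ([' '].isPrefixOf (' ' :: t)) = true :=
          List.isPrefixOf_iff_prefix.mpr ⟨t, rfl⟩
        simp only [PySem.Chars.replace.go, hp, if_true]
        rw [show List.drop [' '].length (' ' :: t) = t from rfl,
          show ['_'].reverse ++ acc = '_' :: acc from rfl,
          ih t ('_' :: acc) (by simp at h ⊢; omega)]
        simp [pvSp]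
      · have hp : ([' '].isPrefixOf (c :: t)) = false := by
          cases hb : [' '].isPrefixOf (c :: t)
          · rfl
          · have := List.isPrefixOf_iff_prefix.mp hb
            rw [List.cons_prefix_cons] at this
            exact absurd this.1.symm hc
        simp only [PySem.Chars.replace.go, hp, Bool.false_eq_true, if_false]
        rw [ih t (c :: acc) (by simp at h ⊢; omega)]
        simp [pvSp, hc]

theorem pvReplaceSp_eq (cs : List Char) :
    PySem.Chars.replace cs [' '] ['_'] = cs.map pvSp := by
  simpa [PySem.Chars.replace] using pvGoSp_eq cs.length cs [] le_rfl

theorem pvFilterMap (l : List Char) : ∀ b,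
    pvSqU b ((l.map pvSp).filter pvKeep) = pvSq b l := by
  induction l with
  | nil => intro b; rfl
  | cons c t ih =>
    intro b
    by_cases ha : PySem.Chars.isalnum c = true
    · have hne : c ≠ ' ' := by rintro rfl; exact absurd ha (by decide)
      have hnu : c ≠ '_' := by rintro rfl; exact absurd ha (by decide)
      simp [pvSp, hne, pvKeep, ha, pvSqU, hnu, pvSq, ih]
    · by_cases hs : c = ' ' ∨ c = '_'
      · rcases hs with rfl | rfl <;> cases b <;>
          simp [pvSp, pvKeep, pvSqU, pvSq, ha, ih]
      · have h1 : c ≠ ' ' := fun hc => hs (Or.inl hc)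
        have h2 : c ≠ '_' := fun hc => hs (Or.inr hc)
        simp [pvSp, h1, pvKeep, ha, h2, pvSq, ih]

theorem pvFoldl (l : List Char) : ∀ (acc : List Char) (b : Bool),
    (l.foldl pvStep (acc, b)).1 = acc ++ pvSq b l := by
  induction l with
  | nil => intro acc b; simp [pvSq]
  | cons c t ih =>
    intro acc b
    by_cases ha : PySem.Chars.isalnum c = true
    · simp [List.foldl_cons, pvStep, ha, pvSq, ih]
    · by_cases hs : c = ' ' ∨ c = '_'
      · cases b <;> simp [List.foldl_cons, pvStep, ha, hs, pvSq, ih]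
      · simp [List.foldl_cons, pvStep, ha, hs, pvSq, ih]

-- ===== VERDICT (by name: the statement is the Claim_ definition above) =====
theorem generate_show_id_spec : Claim_equal_generate_show_id := by
  unfold Claim_equal_generate_show_id Spec_generate_show_id
  intro t s _
  have key : pvCollapse ((PySem.Chars.replace (PySem.Chars.lower t.toList) [' '] ['_']).filter pvKeep)
      = ((PySem.Chars.lower t.toList).foldl pvStep ([], false)).1 := by
    rw [pvReplaceSp_eq, pvCollapse_eq, pvFilterMap, pvFoldl]
    simp
  simp only [generate_show_id, generate_show_id_alt, key]
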